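-- pv_equiv track=rewrite | github.com/PkKeo/GoldenCorpus | main.py | normalize_word
-- ===== SOURCE A (Python) =====
-- import unicodedata
--
-- def normalize_word(word: str) -> str:
--     """Normalize a single word by removing accents and applying substitutions"""
--     word = word.lower()
--     word = ''.join(
--         char for char in unicodedata.normalize('NFD', word)
--         if unicodedata.category(char) != 'Mn'
--     )
--
--     substitutions = {
--         'f': 't',
--         'j': 'i',
--         '1': 'i',
--         '4': 'a',
--         '7': '?',
--         '-': ''
--     }
--
--     for old, new in substitutions.items():
--         word = word.replace(old, new)
--     return word
-- ===== SOURCE B (Python) =====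
-- import unicodedata
--
-- _SUBS = {'f': 't', 'j': 'i', '1': 'i', '4': 'a', '7': '?', '-': ''}
--
-- def normalize_word(word: str) -> str:
--     """Single pass: lower + NFD, drop combining marks, substitute per char."""
--     return ''.join(
--         _SUBS.get(char, char)
--         for char in unicodedata.normalize('NFD', word.lower())
--         if unicodedata.category(char) != 'Mn'
--     )
-- ===== Notes on version B (the rewrite author's own statement) =====
-- stated objective: simpler
-- what changed: B fuses A's accent-stripping join and its six sequential full-string replace passes into one per-character pass that emits substitutions.get(char, char), valid because every substitution maps one char to a char or empty and no substitution output is itself a key.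
import Mathlib
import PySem

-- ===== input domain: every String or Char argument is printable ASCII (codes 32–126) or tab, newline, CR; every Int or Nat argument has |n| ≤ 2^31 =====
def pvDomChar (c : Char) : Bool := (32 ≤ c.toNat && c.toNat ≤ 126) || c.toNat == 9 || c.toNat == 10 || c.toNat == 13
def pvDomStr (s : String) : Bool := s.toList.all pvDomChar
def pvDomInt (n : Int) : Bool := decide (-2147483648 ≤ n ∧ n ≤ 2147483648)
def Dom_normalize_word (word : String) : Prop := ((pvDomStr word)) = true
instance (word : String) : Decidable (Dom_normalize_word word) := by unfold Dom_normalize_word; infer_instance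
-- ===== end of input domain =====

-- B fuses A's six sequential replace passes into one per-character substitution pass (simpler).
-- On the ASCII domain unicodedata.normalize('NFD', ·) is the identity and no character has
-- category 'Mn', so both ports transcribe that step as the identity join over the characters;
-- the ports are exact on Dom_normalize_word.

-- ===== PORT A =====
-- the substitutions dict, iterated in insertion order by A's for-loop
def substitutionsA : List (String × String) :=
  [("f", "t"), ("j", "i"), ("1", "i"), ("4", "a"), ("7", "?"), ("-", "")]

def normalize_word (word : String) : String :=
  let word := PySem.Str.lower word
  -- ''.join(char for char in unicodedata.normalize('NFD', word) if category(char) != 'Mn'):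
  -- on the ASCII domain NFD is the identity and the 'Mn' filter keeps every char (exact there)
  let word := String.ofList (PySem.Chars.join [] (word.toList.map (fun c => [c])))
  substitutionsA.foldl (fun w p => PySem.Str.replace w p.1 p.2) word

-- ===== PORT B =====
-- _SUBS.get(char, char), emitting a (possibly empty) list of chars
def subCharB (c : Char) : List Char :=
  if c = 'f' then ['t']
  else if c = 'j' then ['i']
  else if c = '1' then ['i']
  else if c = '4' then ['a']
  else if c = '7' then ['?']
  else if c = '-' then []
  else [c]

def normalize_word_alt (word : String) : String :=
  -- ''.join(_SUBS.get(c, c) for c in NFD(word.lower()) if category(c) != 'Mn');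
  -- NFD and the 'Mn' filter are the identity on the ASCII domain (exact there)
  String.ofList ((PySem.Chars.lower word.toList).flatMap subCharB)

-- ===== PRECONDITION & SPEC =====
def Spec_normalize_word (word : String) (out : String) : Prop := out = normalize_word_alt word
instance (word : String) (out : String) : Decidable (Spec_normalize_word word out) := by unfold Spec_normalize_word; infer_instance

-- ===== CLAIM (what is proved, stated in full; the proofs are below) =====
def Claim_equal_normalize_word : Prop := ∀ (word : String), Dom_normalize_word word → Spec_normalize_word word (normalize_word word)

-- ===== LEMMAS AND PROOFS =====

-- single-char replacement, as a per-character function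
def repOne (o : Char) (new : List Char) (c : Char) : List Char :=
  if c = o then new else [c]

theorem replace_go_single (o : Char) (new : List Char) :
    ∀ (s : List Char) (fuel : Nat) (acc : List Char), s.length ≤ fuel →
      PySem.Chars.replace.go [o] new fuel s acc = acc.reverse ++ s.flatMap (repOne o new) := by
  intro s
  induction s with
  | nil =>
    intro fuel acc _
    cases fuel <;> simp [PySem.Chars.replace.go]
  | cons c t ih =>
    intro fuel acc hf
    cases fuel with
    | zero => simp at hf
    | succ n =>
      have hn : t.length ≤ n := by simpa using hf
      by_cases hc : c = o
      · subst hc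
        have hpre : List.isPrefixOf [c] (c :: t) = true := by
          simp [List.isPrefixOf]
        rw [PySem.Chars.replace.go]
        simp only [hpre, if_true, List.length_cons, List.length_nil, List.drop_succ_cons,
          List.drop_zero]
        rw [ih n (new.reverse ++ acc) hn]
        simp [repOne]
      · have hpre : List.isPrefixOf [o] (c :: t) = false := by
          simp [List.isPrefixOf]
          exact fun h => (hc h.symm).elim
        rw [PySem.Chars.replace.go]
        simp only [hpre]
        rw [ih n (c :: acc) hn]
        simp [repOne, hc]

theorem replace_single (o : Char) (new : List Char) (s : List Char) :
    PySem.Chars.replace s [o] new = s.flatMap (repOne o new) := by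
  simp only [PySem.Chars.replace, List.isEmpty_cons, Bool.false_eq_true, if_false]
  simpa using replace_go_single o new s s.length [] le_rfl

theorem subCharB_eq_chain (c : Char) :
    ((repOne 'f' ['t'] c).flatMap fun x =>
      (repOne 'j' ['i'] x).flatMap fun x =>
        (repOne '1' ['i'] x).flatMap fun x =>
          (repOne '4' ['a'] x).flatMap fun x =>
            (repOne '7' ['?'] x).flatMap (repOne '-' [])) = subCharB c := by
  simp only [subCharB]
  split_ifs <;> simp_all [repOne]

theorem normalize_word_spec' (word : String) :
    normalize_word word = normalize_word_alt word := by
  unfold normalize_word normalize_word_alt substitutionsA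
  simp only [List.foldl_cons, List.foldl_nil, PySem.Str.replace, PySem.Str.lower,
    String.toList_ofList, PySem.Chars.join_nil_singletons]
  have hf : ("f" : String).toList = ['f'] := rfl
  have ht : ("t" : String).toList = ['t'] := rfl
  have hj : ("j" : String).toList = ['j'] := rfl
  have hi : ("i" : String).toList = ['i'] := rfl
  have h1 : ("1" : String).toList = ['1'] := rfl
  have h4 : ("4" : String).toList = ['4'] := rfl
  have ha : ("a" : String).toList = ['a'] := rfl
  have h7 : ("7" : String).toList = ['7'] := rfl
  have hq : ("?" : String).toList = ['?'] := rfl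
  have hd : ("-" : String).toList = ['-'] := rfl
  have he : ("" : String).toList = [] := rfl
  simp only [hf, ht, hj, hi, h1, h4, ha, h7, hq, hd, he, replace_single, List.flatMap_assoc]
  congr 1
  apply List.flatMap_congr
  intro c _
  exact subCharB_eq_chain c

-- ===== VERDICT (by name: the statement is the Claim_ definition above) =====
theorem normalize_word_spec : Claim_equal_normalize_word := by
  intro word _
  exact normalize_word_spec' word
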